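-- pv_equiv track=rewrite | github.com/AMGrobelnik/ai-inventor-old3 | aii_lib/src/aii_lib/workflows/cited_args/matching.py | _try_match_from
-- ===== SOURCE A (Python) =====
-- MAX_WORD_GAP = 20
--
-- MAX_ELLIPSIS_GAP = 500
--
-- def _try_match_from(
--     quote_words: list[str],
--     word_positions: dict[str, list[int]],
--     start_pos: int
-- ) -> bool:
--     """Try to match all quote words starting from a position."""
--     current_pos = start_pos
--
--     for i, word in enumerate(quote_words[1:], 1):
--         if word not in word_positions:
--             return False
--
--         # Find the next occurrence of this word after current_pos
--         # but within a reasonable gap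
--         positions = word_positions[word]
--
--         # Determine max gap - use larger gap if we might be crossing an ellipsis
--         # (detected by larger jumps in successful matches)
--         max_gap = MAX_WORD_GAP
--
--         found_pos = None
--         for pos in positions:
--             if pos > current_pos:
--                 gap = pos - current_pos
--                 if gap <= max_gap:
--                     found_pos = pos
--                     break
--                 elif gap <= MAX_ELLIPSIS_GAP:
--                     # Allow larger gap (ellipsis case) but keep looking for closer match
--                     if found_pos is None:
--                         found_pos = pos
--                     break
--
--         if found_pos is None:
--             return False
--
--         current_pos = found_pos
--
--     return True
-- ===== SOURCE B (Python) =====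
-- MAX_WORD_GAP = 20
--
-- MAX_ELLIPSIS_GAP = 500
--
-- def _try_match_from(quote_words, word_positions, start_pos):
--     """Recursive reformulation: the first listed position in (start_pos, start_pos+500] is the match."""
--     if len(quote_words) <= 1:
--         return True
--     word = quote_words[1]
--     nxt = next((p for p in word_positions.get(word, [])
--                 if start_pos < p <= start_pos + MAX_ELLIPSIS_GAP), None)
--     return nxt is not None and _try_match_from(quote_words[1:], word_positions, nxt)
-- ===== Notes on version B (the rewrite author's own statement) =====
-- stated objective: simpler
-- what changed: B replaces A's imperative scan with mutable found_pos/max_gap bookkeeping by a recursion over the word list that picks the first listed position in (current, current+500] with one predicate, since A's gap<=20 branch is subsumed by the gap<=500 branch.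
import Mathlib
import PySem

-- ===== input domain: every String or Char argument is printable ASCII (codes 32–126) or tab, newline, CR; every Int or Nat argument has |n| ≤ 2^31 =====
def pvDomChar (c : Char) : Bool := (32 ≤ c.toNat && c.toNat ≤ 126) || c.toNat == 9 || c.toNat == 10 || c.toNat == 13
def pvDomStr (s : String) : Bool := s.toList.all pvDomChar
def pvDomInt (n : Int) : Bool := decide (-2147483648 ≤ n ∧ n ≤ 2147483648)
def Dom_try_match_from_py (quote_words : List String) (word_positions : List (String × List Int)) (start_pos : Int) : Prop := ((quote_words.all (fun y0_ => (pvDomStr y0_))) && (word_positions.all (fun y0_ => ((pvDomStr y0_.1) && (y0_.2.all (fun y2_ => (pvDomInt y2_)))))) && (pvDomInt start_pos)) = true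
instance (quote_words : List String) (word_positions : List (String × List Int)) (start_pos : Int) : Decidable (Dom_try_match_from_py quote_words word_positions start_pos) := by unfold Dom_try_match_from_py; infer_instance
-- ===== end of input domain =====

-- B is a simpler recursive reformulation: A's gap<=20 branch is subsumed by its gap<=500 branch,
-- so the match is just the first listed position in (current, current+500]; return-value equivalence only.

-- ===== PORT A =====
-- inner 'for pos in positions' loop of A, carrying the mutable found_pos
def pvLoopA (positions : List Int) (current_pos : Int) (found_pos : Option Int) : Option Int :=
  match positions with
  | [] => found_pos
  | pos :: rest =>
    if pos > current_pos then
      let gap := pos - current_pos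
      if gap ≤ 20 then some pos            -- found_pos = pos; break
      else if gap ≤ 500 then               -- ellipsis case, then break
        (if found_pos = none then some pos else found_pos)
      else pvLoopA rest current_pos found_pos
    else pvLoopA rest current_pos found_pos

-- outer 'for i, word in enumerate(quote_words[1:], 1)' loop (index i unused by A's body)
def pvGoA (words : List String) (word_positions : List (String × List Int)) (current_pos : Int) : Bool :=
  match words with
  | [] => true
  | word :: rest =>
    match List.lookup word word_positions with  -- 'word not in word_positions' / 'word_positions[word]': first match
    | none => false
    | some positions =>
      match pvLoopA positions current_pos none with
      | none => false
      | some found_pos => pvGoA rest word_positions found_pos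

def try_match_from_py (quote_words : List String) (word_positions : List (String × List Int)) (start_pos : Int) : Bool :=
  pvGoA (quote_words.drop 1) word_positions start_pos   -- quote_words[1:]

-- ===== PORT B =====
def try_match_from_py_alt (quote_words : List String) (word_positions : List (String × List Int)) (start_pos : Int) : Bool :=
  match quote_words with
  | _ :: word :: rest =>
    match ((List.lookup word word_positions).getD []).find?
        (fun p => decide (start_pos < p) && decide (p ≤ start_pos + 500)) with
    | none => false
    | some nxt => try_match_from_py_alt (word :: rest) word_positions nxt
  | _ => true

-- ===== PRECONDITION & SPEC =====
def Spec_try_match_from_py (quote_words : List String) (word_positions : List (String × List Int)) (start_pos : Int) (out : Bool) : Prop := out = try_match_from_py_alt quote_words word_positions start_pos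
instance (quote_words : List String) (word_positions : List (String × List Int)) (start_pos : Int) (out : Bool) : Decidable (Spec_try_match_from_py quote_words word_positions start_pos out) := by unfold Spec_try_match_from_py; infer_instance

-- ===== CLAIM (what is proved, stated in full; the proofs are below) =====
def Claim_equal_try_match_from_py : Prop := ∀ (quote_words : List String) (word_positions : List (String × List Int)) (start_pos : Int), Dom_try_match_from_py quote_words word_positions start_pos → Spec_try_match_from_py quote_words word_positions start_pos (try_match_from_py quote_words word_positions start_pos)

-- ===== LEMMAS AND PROOFS =====

-- ===== VERDICT (by name: the statement is the Claim_ definition above) =====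
theorem pvLoopA_eq_find? (ps : List Int) (cur : Int) :
    pvLoopA ps cur none = ps.find? (fun p => decide (cur < p) && decide (p ≤ cur + 500)) := by
  induction ps with
  | nil => rfl
  | cons p rest ih =>
    simp only [pvLoopA, List.find?]
    by_cases h1 : cur < p
    · by_cases h2 : p ≤ cur + 500
      · have h4 : p - cur ≤ 500 := by omega
        by_cases h3 : p - cur ≤ 20 <;> simp [h1, h2, h3, h4]
      · have h3 : ¬ (p - cur ≤ 20) := by omega
        have h4 : ¬ (p - cur ≤ 500) := by omega
        simp [h1, h2, h3, h4, ih]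
    · simp [h1, ih]

theorem pvGoA_eq_alt (ws : List String) (wp : List (String × List Int)) (cur : Int) (x : String) :
    pvGoA ws wp cur = try_match_from_py_alt (x :: ws) wp cur := by
  induction ws generalizing cur x with
  | nil => rfl
  | cons w rest ih =>
    simp only [pvGoA, try_match_from_py_alt, pvLoopA_eq_find?]
    cases h : List.lookup w wp with
    | none => simp
    | some positions =>
      simp only [Option.getD_some]
      cases hf : positions.find? (fun p => decide (cur < p) && decide (p ≤ cur + 500)) with
      | none => rfl
      | some nxt => exact ih nxt w

theorem try_match_from_py_spec : Claim_equal_try_match_from_py := by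
  intro qw wp sp _
  unfold Spec_try_match_from_py try_match_from_py
  cases qw with
  | nil => rfl
  | cons x rest => exact pvGoA_eq_alt rest wp sp x
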